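-- pv_equiv track=rewrite | github.com/Karolina-Szlek/Python_listy | 9zad1wpr.py | reprezentant
-- ===== SOURCE A (Python) =====
-- def reprezentant(L):
--     maks=0
--     mala=0
--     for i in L:
--         if len(str(i))>maks:
--             maks=len(str(i))
--             mala=i
--     for i in L:
--         if len(str(i))==maks and i<mala:
--             mala=i
--     return mala
-- ===== SOURCE B (Python) =====
-- def reprezentant(L):
--     maks = 0
--     mala = 0
--     for i in L:
--         l = len(str(i))
--         if l > maks or (l == maks and i < mala):
--             maks = l
--             mala = i
--     return mala
-- ===== Notes on version B (the rewrite author's own statement) =====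
-- stated objective: simpler
-- what changed: Replaces A's two passes (first find the longest str-length and its first element, then re-scan for the minimum at that length) with one pass maintaining the (max-length, min-value-at-that-length) pair.
import Mathlib
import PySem

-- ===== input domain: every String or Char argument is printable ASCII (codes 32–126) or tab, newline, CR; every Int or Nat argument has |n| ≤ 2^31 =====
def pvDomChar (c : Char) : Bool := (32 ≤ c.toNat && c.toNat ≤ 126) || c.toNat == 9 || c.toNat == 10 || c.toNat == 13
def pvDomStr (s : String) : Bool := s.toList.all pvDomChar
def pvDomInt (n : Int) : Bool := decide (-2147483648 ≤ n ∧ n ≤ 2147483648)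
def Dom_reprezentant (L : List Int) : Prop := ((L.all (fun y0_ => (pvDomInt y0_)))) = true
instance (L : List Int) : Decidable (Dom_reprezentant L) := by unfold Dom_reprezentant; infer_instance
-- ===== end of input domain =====

-- B replaces A's two passes (find max digit-length, then min among that length) with a
-- single pass keeping the (max-length, min-value-at-that-length) winner; objective: simpler.

-- ===== PORT A =====
-- pass 1: find the length of the longest str(i) and the first element attaining it
def reprezentantPass1 (L : List Int) : Int × Int :=
  L.foldl (fun st i =>
    if PySem.Str.len (PySem.Int.toStr i) > st.1 then (PySem.Str.len (PySem.Int.toStr i), i)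
    else st) (0, 0)

-- pass 2: among elements of that length, walk down to the minimum
def reprezentant (L : List Int) : Int :=
  let st := reprezentantPass1 L
  L.foldl (fun mala i =>
    if PySem.Str.len (PySem.Int.toStr i) = st.1 ∧ i < mala then i else mala) st.2

-- ===== PORT B =====
def reprezentant_alt (L : List Int) : Int :=
  (L.foldl (fun st i =>
    let l := PySem.Str.len (PySem.Int.toStr i)
    if l > st.1 ∨ (l = st.1 ∧ i < st.2) then (l, i) else st) (0, 0)).2

-- ===== PRECONDITION & SPEC =====
def Spec_reprezentant (L : List Int) (out : Int) : Prop := out = reprezentant_alt L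
instance (L : List Int) (out : Int) : Decidable (Spec_reprezentant L out) := by unfold Spec_reprezentant; infer_instance

-- ===== CLAIM (what is proved, stated in full; the proofs are below) =====
def Claim_equal_reprezentant : Prop := ∀ (L : List Int), Dom_reprezentant L → Spec_reprezentant L (reprezentant L)

-- ===== LEMMAS AND PROOFS =====

-- abbreviation used only by the proofs
def pvSlen (i : Int) : Int := PySem.Str.len (PySem.Int.toStr i)

def pvBFold (L : List Int) : Int × Int :=
  L.foldl (fun st i =>
    if pvSlen i > st.1 ∨ (pvSlen i = st.1 ∧ i < st.2) then (pvSlen i, i) else st) (0, 0)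

lemma reprezentant_alt_eq (L : List Int) : reprezentant_alt L = (pvBFold L).2 := rfl

-- pass 2 leaves its accumulator alone when every element's length is below the target
lemma pass2_const (L : List Int) (M s : Int) (h : ∀ i ∈ L, pvSlen i < M) :
    L.foldl (fun mala i => if pvSlen i = M ∧ i < mala then i else mala) s = s := by
  induction L generalizing s with
  | nil => rfl
  | cons x xs ih =>
    simp only [List.foldl_cons]
    have hx := h x (by simp)
    rw [if_neg (by rintro ⟨h1, _⟩; omega)]
    exact ih s (fun i hi => h i (List.mem_cons_of_mem _ hi))

-- main invariant: B's running pair is (A's pass-1 max, A's full result), and bounds all lengths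
lemma pvMain (L : List Int) :
    (pvBFold L).1 = (reprezentantPass1 L).1 ∧ (pvBFold L).2 = reprezentant L ∧
    (∀ i ∈ L, pvSlen i ≤ (pvBFold L).1) := by
  induction L using List.reverseRecOn with
  | nil => exact ⟨rfl, rfl, by simp⟩
  | append_singleton L x ih =>
    obtain ⟨hm, ha, hb⟩ := ih
    have hBapp : pvBFold (L ++ [x]) =
        (if pvSlen x > (pvBFold L).1 ∨ (pvSlen x = (pvBFold L).1 ∧ x < (pvBFold L).2)
         then (pvSlen x, x) else pvBFold L) := by
      simp [pvBFold, List.foldl_append]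
    have hAapp : reprezentantPass1 (L ++ [x]) =
        (if pvSlen x > (reprezentantPass1 L).1 then (pvSlen x, x) else reprezentantPass1 L) := by
      simp [reprezentantPass1, List.foldl_append, pvSlen]
    by_cases hgt : pvSlen x > (pvBFold L).1
    · -- new strict maximum: both sides converge to x
      have hB : pvBFold (L ++ [x]) = (pvSlen x, x) := by rw [hBapp, if_pos (Or.inl hgt)]
      have hA1 : reprezentantPass1 (L ++ [x]) = (pvSlen x, x) := by
        rw [hAapp, if_pos (hm ▸ hgt)]
      have hR : reprezentant (L ++ [x]) = x := by
        show (L ++ [x]).foldl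
            (fun mala i => if pvSlen i = (reprezentantPass1 (L ++ [x])).1 ∧ i < mala then i else mala)
            (reprezentantPass1 (L ++ [x])).2 = x
        rw [hA1, List.foldl_append,
          pass2_const L (pvSlen x) x (fun i hi => lt_of_le_of_lt (hb i hi) hgt)]
        simp
      refine ⟨by rw [hB, hA1], by rw [hB, hR], ?_⟩
      intro i hi
      rcases List.mem_append.mp hi with hi | hi
      · exact hB ▸ le_of_lt (lt_of_le_of_lt (hb i hi) hgt)
      · simp at hi; simp [hB, hi]
    · -- length not larger: A's pass-1 pair is unchanged
      have hA1 : reprezentantPass1 (L ++ [x]) = reprezentantPass1 L := by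
        rw [hAapp, if_neg (by rw [← hm]; exact hgt)]
      have hR : reprezentant (L ++ [x]) =
          (if pvSlen x = (reprezentantPass1 L).1 ∧ x < reprezentant L then x else reprezentant L) := by
        show (L ++ [x]).foldl
            (fun mala i => if pvSlen i = (reprezentantPass1 (L ++ [x])).1 ∧ i < mala then i else mala)
            (reprezentantPass1 (L ++ [x])).2 = _
        rw [hA1, List.foldl_append]
        rfl
      by_cases heq : pvSlen x = (pvBFold L).1 ∧ x < (pvBFold L).2
      · have hB : pvBFold (L ++ [x]) = (pvSlen x, x) := by rw [hBapp, if_pos (Or.inr heq)]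
        have hcond : pvSlen x = (reprezentantPass1 L).1 ∧ x < reprezentant L :=
          ⟨hm ▸ heq.1, ha ▸ heq.2⟩
        refine ⟨by rw [hB, hA1, ← hm, heq.1], by rw [hB, hR, if_pos hcond], ?_⟩
        intro i hi
        rcases List.mem_append.mp hi with hi | hi
        · have := hb i hi; rw [hB]; dsimp; omega
        · simp at hi; simp [hB, hi]
      · have hB : pvBFold (L ++ [x]) = pvBFold L := by
          rw [hBapp, if_neg (by rintro (h | h); exact hgt h; exact heq h)]
        have hcond : ¬ (pvSlen x = (reprezentantPass1 L).1 ∧ x < reprezentant L) := by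
          rintro ⟨h1, h2⟩; exact heq ⟨hm ▸ h1, ha ▸ h2⟩
        refine ⟨by rw [hB, hA1, hm], by rw [hB, hR, if_neg hcond, ha], ?_⟩
        intro i hi
        rcases List.mem_append.mp hi with hi | hi
        · exact hB ▸ hb i hi
        · simp at hi; subst hi; rw [hB]; omega

-- ===== VERDICT (by name: the statement is the Claim_ definition above) =====
theorem reprezentant_spec : Claim_equal_reprezentant := by
  intro L _
  show reprezentant L = reprezentant_alt L
  rw [reprezentant_alt_eq, (pvMain L).2.1]
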